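-- pv_equiv track=rewrite | github.com/tung-dq-zenai/sdxl-training-runpod | .ipynb_checkpoints/convert_utils-checkpoint.py | add_processor_to_keys
-- ===== SOURCE A (Python) =====
-- def add_processor_to_keys(keys):
--     """Helper function to update keys by adding 'processor' after 'attn*' and before 'to'."""
--     updated_keys = []
--     for key in keys:
--         key_parts = key.split('.')
--         new_key_parts = []
--
--         for i, part in enumerate(key_parts):
--             if part == '0' and (i > 0 and key_parts[i - 1].startswith('to')) and (i + 1 < len(key_parts) and key_parts[i + 1] == 'lora'):
--                 continue
--             new_key_parts.append(part)
--             # Insert 'processor' after 'attn' if followed by 'to*'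
--             if part.startswith('attn') and (i + 1 < len(key_parts)) and key_parts[i + 1].startswith('to'):
--                 new_key_parts.append('processor')
--
--         # Join the modified parts back together
--         modified_key = '.'.join(new_key_parts)
--         modified_key = '.'.join(new_key_parts).replace('lora_A', 'lora.down').replace('lora_B', 'lora.up')
--         updated_keys.append(modified_key)
--
--     return updated_keys
-- ===== SOURCE B (Python) =====
-- def _insert_processor(parts):
--     """Insert 'processor' after each attn* part that is immediately followed by a to* part."""
--     out = []
--     for cur, nxt in zip(parts, parts[1:] + [None]):
--         out.append(cur)
--         if nxt is not None and cur.startswith('attn') and nxt.startswith('to'):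
--             out.append('processor')
--     return out
--
--
-- def _drop_zero(parts):
--     """Drop a '0' part sandwiched between a to* part and a 'lora' part."""
--     prevs = [None] + parts[:-1]
--     nxts = parts[1:] + [None]
--     return [p for prv, p, nxt in zip(prevs, parts, nxts)
--             if not (p == '0' and prv is not None and prv.startswith('to') and nxt == 'lora')]
--
--
-- def add_processor_to_keys(keys):
--     return ['.'.join(_drop_zero(_insert_processor(key.split('.'))))
--                 .replace('lora_A', 'lora.down').replace('lora_B', 'lora.up')
--             for key in keys]
-- ===== Notes on version B (the rewrite author's own statement) =====
-- stated objective: idiomatic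
-- what changed: Replaces A's single indexed loop (with i-1/i+1 lookups into the original part list) by two zip-based passes over the split parts: one pass pairing each part with its successor to insert 'processor', then a filtering pass over (prev, part, next) triples to drop the sandwiched '0'.
import Mathlib
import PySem

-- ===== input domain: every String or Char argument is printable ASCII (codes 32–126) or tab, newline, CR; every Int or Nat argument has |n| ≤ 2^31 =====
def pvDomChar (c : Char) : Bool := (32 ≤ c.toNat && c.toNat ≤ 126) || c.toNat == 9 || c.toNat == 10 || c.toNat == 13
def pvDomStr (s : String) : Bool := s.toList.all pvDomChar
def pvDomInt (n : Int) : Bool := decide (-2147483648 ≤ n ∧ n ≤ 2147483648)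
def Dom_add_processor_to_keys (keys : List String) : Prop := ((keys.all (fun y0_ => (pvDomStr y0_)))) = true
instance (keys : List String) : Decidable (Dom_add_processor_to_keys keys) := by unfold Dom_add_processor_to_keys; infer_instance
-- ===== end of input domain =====

-- B rewrites each key by two zip-based passes over the parts (insert 'processor' after attn*-before-to*,
-- then filter out a '0' sandwiched between to* and 'lora') instead of A's indexed loop; objective: idiomatic.

-- ===== PORT A =====
def addProcLoop (key_parts : List String) (acc : List String) : List (Int × String) → List String
  | [] => acc
  | (i, part) :: rest =>
      if part == "0" && (decide (i > 0) && PySem.Str.startswith (PySem.List.pyGetD key_parts (i - 1) "") "to")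
          && (decide (i + 1 < (key_parts.length : Int)) && (PySem.List.pyGetD key_parts (i + 1) "" == "lora")) then
        addProcLoop key_parts acc rest
      else
        let acc1 := acc ++ [part]
        let acc2 := if PySem.Str.startswith part "attn" && decide (i + 1 < (key_parts.length : Int))
            && PySem.Str.startswith (PySem.List.pyGetD key_parts (i + 1) "") "to" then
            acc1 ++ ["processor"] else acc1
        addProcLoop key_parts acc2 rest

def add_processor_to_keys (keys : List String) : List String :=
  keys.foldl (fun updated_keys key =>
    let key_parts := (PySem.Str.split? key ".").getD []
    let new_key_parts := addProcLoop key_parts [] (PySem.List.enumerate key_parts)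
    let modified_key := PySem.Str.join "." new_key_parts
    let modified_key := PySem.Str.replace (PySem.Str.replace (PySem.Str.join "." new_key_parts) "lora_A" "lora.down") "lora_B" "lora.up"
    updated_keys ++ [modified_key]) []

-- ===== PORT B =====
def insertProcessor (parts : List String) : List String :=
  (parts.zip ((parts.drop 1).map some ++ [none])).foldl (fun out pr =>
    let out := out ++ [pr.1]
    match pr.2 with
    | some nxt =>
        if PySem.Str.startswith pr.1 "attn" && PySem.Str.startswith nxt "to" then out ++ ["processor"] else out
    | none => out) []

def dropZero (parts : List String) : List String :=
  let prevs : List (Option String) := none :: parts.dropLast.map some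
  let nxts : List (Option String) := (parts.drop 1).map some ++ [none]
  (prevs.zip (parts.zip nxts)).filterMap (fun t =>
    if t.2.1 == "0" && (match t.1 with | some prv => PySem.Str.startswith prv "to" | none => false)
        && (t.2.2 == some "lora") then none else some t.2.1)

def add_processor_to_keys_alt (keys : List String) : List String :=
  keys.map (fun key =>
    PySem.Str.replace (PySem.Str.replace
      (PySem.Str.join "." (dropZero (insertProcessor ((PySem.Str.split? key ".").getD []))))
      "lora_A" "lora.down") "lora_B" "lora.up")

-- ===== PRECONDITION & SPEC =====
def Spec_add_processor_to_keys (keys : List String) (out : List String) : Prop := out = add_processor_to_keys_alt keys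
instance (keys : List String) (out : List String) : Decidable (Spec_add_processor_to_keys keys out) := by unfold Spec_add_processor_to_keys; infer_instance

-- ===== CLAIM (what is proved, stated in full; the proofs are below) =====
def Claim_equal_add_processor_to_keys : Prop := ∀ (keys : List String), Dom_add_processor_to_keys keys → Spec_add_processor_to_keys keys (add_processor_to_keys keys)

-- ===== LEMMAS AND PROOFS =====

-- Common recursive characterisation of the per-key rewriting of both programs.
def specRec (prvTo : Bool) : List String → List String
  | [] => []
  | p :: rest =>
      if p == "0" && prvTo && (rest.head? == some "lora") then
        specRec (PySem.Str.startswith p "to") rest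
      else
        p :: ((match rest.head? with
               | some q => if PySem.Str.startswith p "attn" && PySem.Str.startswith q "to" then ["processor"] else []
               | none => []) ++ specRec (PySem.Str.startswith p "to") rest)

def insRec : List String → List String
  | [] => []
  | p :: rest =>
      p :: ((match rest.head? with
             | some q => if PySem.Str.startswith p "attn" && PySem.Str.startswith q "to" then ["processor"] else []
             | none => []) ++ insRec rest)

def dropRec (prv : Option String) : List String → List String
  | [] => []
  | p :: rest =>
      (if p == "0" && (match prv with | some s => PySem.Str.startswith s "to" | none => false)
          && (rest.head? == some "lora") then [] else [p]) ++ dropRec (some p) rest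

theorem dropRec_cons (prv : Option String) (p : String) (rest : List String) :
    dropRec prv (p :: rest) =
      (if p == "0" && (match prv with | some s => PySem.Str.startswith s "to" | none => false)
          && (rest.head? == some "lora") then [] else [p]) ++ dropRec (some p) rest := rfl

theorem startswith_attn_not_to (p : String) (h : PySem.Str.startswith p "attn" = true) :
    PySem.Str.startswith p "to" = false := by
  by_contra hb
  have h2 : PySem.Str.startswith p "to" = true := by
    cases hx : PySem.Str.startswith p "to" <;> simp_all
  have h1' := (PySem.Chars.startswith_iff _ _).mp (by simpa using h)
  have h2' := (PySem.Chars.startswith_iff _ _).mp (by simpa using h2)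
  obtain ⟨t1, ht1⟩ := h1'
  obtain ⟨t2, ht2⟩ := h2'
  rw [← ht1] at ht2
  simp at ht2

theorem startswith_to_ne_lora (q : String) (h : PySem.Str.startswith q "to" = true) :
    (q == "lora") = false := by
  cases hx : q == "lora"
  · rfl
  · have hq : q = "lora" := by simpa using hx
    subst hq
    exact absurd h (by decide)

theorem head_insRec (rest : List String) : (insRec rest).head? = rest.head? := by
  cases rest <;> simp [insRec]

theorem ins_eq_aux (parts : List String) :
    ∀ acc : List String,
      (parts.zip ((parts.drop 1).map some ++ [none])).foldl (fun out pr =>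
        let out := out ++ [pr.1]
        match pr.2 with
        | some nxt =>
            if PySem.Str.startswith pr.1 "attn" && PySem.Str.startswith nxt "to" then out ++ ["processor"] else out
        | none => out) acc = acc ++ insRec parts := by
  induction parts with
  | nil => intro acc; simp [insRec]
  | cons p rest ih =>
      intro acc
      cases rest with
      | nil => simp [insRec]
      | cons q rs =>
          have hz : (p :: q :: rs).zip (((p :: q :: rs).drop 1).map some ++ [none]) =
              (p, some q) :: ((q :: rs).zip (((q :: rs).drop 1).map some ++ [none])) := by
            simp
          rw [hz, List.foldl_cons, ih]
          simp only [insRec, List.head?_cons]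
          split <;> simp

theorem ins_eq (parts : List String) : insertProcessor parts = insRec parts := by
  unfold insertProcessor
  rw [ins_eq_aux parts [], List.nil_append]

theorem drop_eq_aux (parts : List String) :
    ∀ prv : Option String,
      ((prv :: parts.dropLast.map some).zip (parts.zip ((parts.drop 1).map some ++ [none]))).filterMap (fun t =>
        if t.2.1 == "0" && (match t.1 with | some prv => PySem.Str.startswith prv "to" | none => false)
            && (t.2.2 == some "lora") then none else some t.2.1) = dropRec prv parts := by
  induction parts with
  | nil => intro prv; simp [dropRec]
  | cons p rest ih =>
      intro prv
      cases rest with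
      | nil => simp [dropRec]
      | cons q rs =>
          have hz : ((prv :: (p :: q :: rs).dropLast.map some).zip ((p :: q :: rs).zip (((p :: q :: rs).drop 1).map some ++ [none]))) =
              (prv, (p, some q)) :: ((some p :: (q :: rs).dropLast.map some).zip ((q :: rs).zip (((q :: rs).drop 1).map some ++ [none]))) := by
            simp
          rw [hz, List.filterMap_cons, ih (some p)]
          conv_rhs => rw [dropRec_cons]
          clear hz
          cases prv with
          | none => simp
          | some pv =>
              by_cases h1 : p = "0" <;> by_cases h2 : PySem.Str.startswith pv "to" = true <;>
                by_cases h3 : q = "lora" <;> simp_all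

theorem drop_eq (parts : List String) : dropZero parts = dropRec none parts := by
  unfold dropZero
  exact drop_eq_aux parts none

theorem dropRec_insRec (parts : List String) :
    ∀ prv : Option String,
      dropRec prv (insRec parts) =
        specRec (match prv with | some s => PySem.Str.startswith s "to" | none => false) parts := by
  induction parts with
  | nil => intro prv; simp [insRec, dropRec, specRec]
  | cons p rest ih =>
      intro prv
      cases hh : rest.head? with
      | none =>
          cases rest with
          | cons q rs => simp at hh
          | nil => simp [insRec, dropRec, specRec]
      | some q =>
          by_cases hbb : (PySem.Str.startswith p "attn" = true ∧ PySem.Str.startswith q "to" = true)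
          · have hb1' : PySem.Chars.startswith p.toList ['a','t','t','n'] = true := by simpa using hbb.1
            have hb2' : PySem.Chars.startswith q.toList ['t','o'] = true := by simpa using hbb.2
            have hpt' : PySem.Chars.startswith p.toList ['t','o'] = false := by
              simpa using startswith_attn_not_to p hbb.1
            have hnl' : ¬ q = "lora" := by simpa using startswith_to_ne_lora q hbb.2
            have hi2 := ih (some "processor")
            have hproc' : PySem.Chars.startswith ['p','r','o','c','e','s','s','o','r'] ['t','o'] = false := by
              decide
            simp [insRec, dropRec_cons, specRec, hh, hb1', hb2', hpt', hnl', hproc', hi2]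
          · have hi2 := ih (some p)
            have hins2 : ¬ (PySem.Chars.startswith p.toList ['a','t','t','n'] = true ∧
                PySem.Chars.startswith q.toList ['t','o'] = true) := by
              simpa using hbb
            simp [insRec, dropRec_cons, specRec, hh, head_insRec, hi2, hins2]
            by_cases hC : ((p = "0" ∧ (match prv with
                | some s => PySem.Chars.startswith s.toList ['t','o'] | none => false) = true) ∧ q = "lora") <;>
              simp [hC]

set_option maxHeartbeats 1000000 in
theorem aLoop_eq (s : List String) :
    ∀ (L : List String) (i : Nat) (acc : List String), L.drop i = s →
      addProcLoop L acc (PySem.List.enumerate s (i : Int)) =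
        acc ++ specRec (decide (0 < i) && PySem.Str.startswith (PySem.List.pyGetD L ((i : Int) - 1) "") "to") s := by
  induction s with
  | nil => intro L i acc _; simp [PySem.List.enumerate, addProcLoop, specRec]
  | cons p ss ih =>
      intro L i acc hd
      have hi : i < L.length := by
        by_contra h
        have : L.drop i = [] := List.drop_eq_nil_of_le (by omega)
        rw [this] at hd; exact absurd hd (by simp)
      have hlen : L.length = i + 1 + ss.length := by
        have := congrArg List.length hd
        simp [List.length_drop] at this
        omega
      have hLi : L[i]? = some p := by
        have : (L.drop i)[0]? = L[i]? := by simp [List.getElem?_drop]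
        rw [hd] at this; simpa using this.symm
      have hrest : L.drop (i + 1) = ss := by
        have : L.drop (i + 1) = (L.drop i).drop 1 := by simp [List.drop_drop]
        rw [this, hd]; simp
      have hnext : L[i + 1]? = ss.head? := by
        have : (L.drop (i + 1))[0]? = L[(i+1)]? := by simp [List.getElem?_drop]
        rw [hrest] at this
        rw [← this]; cases ss <;> simp
      have hb2 : ((i : Int) + 1) = (((i + 1 : Nat)) : Int) := by push_cast; ring
      have ihs := fun acc' => ih L (i + 1) acc' hrest
      rw [PySem.List.enumerate_cons]
      simp only [addProcLoop]
      rw [hb2]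
      cases ss with
      | nil =>
          have hlen' : L.length = i + 1 := by simpa using hlen
          have hnltI : ¬ ((i : Int) + 1 < (L.length : Int)) := by omega
          simp [hnltI, addProcLoop, specRec, PySem.List.enumerate]
      | cons qq qs =>
          have hlen' : L.length = i + 1 + qs.length + 1 := by simpa using hlen
          have htlt : i + 1 < L.length := by omega
          have hgetD1' : PySem.List.pyGetD L (((i + 1 : Nat)) : Int) "" = qq := by
            rw [← hb2]
            have : ((i : Int) + 1) = (((i + 1 : Nat)) : Int) := hb2
            rw [this, PySem.List.pyGetD_natCast]
            simp [List.getD, hnext]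
          have hg1 : PySem.Chars.startswith ['0'] ['a','t','t','n'] = false := by decide
          have hg2 : PySem.Chars.startswith ['0'] ['t','o'] = false := by decide
          have hg3 : PySem.Chars.startswith ['l','o','r','a'] ['t','o'] = false := by decide
          have hg4 : PySem.Chars.startswith ['l','o','r','a'] ['a','t','t','n'] = false := by decide
          have htltI : ((i : Int) + 1 < (L.length : Int)) := by omega
          have hgetDI : PySem.List.pyGetD L ((i : Int) + 1) "" = qq := by
            rw [hb2]; exact hgetD1'
          simp only [ihs]
          by_cases hP0 : p = "0" <;> by_cases h0i : 0 < i <;>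
            by_cases hA : PySem.Chars.startswith (PySem.List.pyGetD L ((i : Int) - 1) "").toList ['t','o'] = true <;>
            by_cases hQl : qq = "lora" <;>
            · simp [specRec, htltI, hgetDI, hLi, hP0, h0i, hA, hQl, hg1, hg2, hg3, hg4]
              try (split <;> (rename_i hS; simp [hS, specRec, hLi, hP0, hg1, hg2, hg3]))

theorem perKey (parts : List String) :
    addProcLoop parts [] (PySem.List.enumerate parts) = dropZero (insertProcessor parts) := by
  have h0 : addProcLoop parts [] (PySem.List.enumerate parts ((0 : Nat) : Int)) =
      [] ++ specRec (decide (0 < 0) && PySem.Str.startswith (PySem.List.pyGetD parts (((0:Nat) : Int) - 1) "") "to") parts :=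
    aLoop_eq parts parts 0 [] (by simp)
  simp only [Nat.cast_zero, Nat.lt_irrefl, List.nil_append] at h0
  have h0' : addProcLoop parts [] (PySem.List.enumerate parts) = specRec false parts := by
    simpa using h0
  rw [h0', drop_eq, ins_eq, dropRec_insRec parts none]

-- ===== VERDICT (by name: the statement is the Claim_ definition above) =====
theorem add_processor_to_keys_spec : Claim_equal_add_processor_to_keys := by
  intro keys _
  unfold Spec_add_processor_to_keys add_processor_to_keys add_processor_to_keys_alt
  rw [PySem.List.foldl_append_singleton_eq_map]
  simp only [List.nil_append]
  apply List.map_congr_left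
  intro key _
  rw [perKey]
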